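-- pv_equiv track=rewrite | github.com/skits4107/wordle_solver | main.py | get_correctness
-- ===== SOURCE A (Python) =====
-- def get_correctness(guess, word_to_solve):
--     correctness = {}
--     remaining_letters = list(word_to_solve)
--
--     for i in range(len(guess)):
--         if guess[i] == remaining_letters[i]:
--             # mark letter as used
--             remaining_letters[i] = None
--             # 1 for correct letter and spot
--             correctness[i] = 1
--
--         elif guess[i] in remaining_letters:
--             # mark letter as used
--             remaining_letters[remaining_letters.index(guess[i])] = None
--             #0 for crrect letter in wrong spot
--             correctness[i] = 0
--
--         else:
--              # -1 for wrong letter completely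
--             correctness[i] = -1
--
--     return correctness
-- ===== SOURCE B (Python) =====
-- def get_correctness(guess, word_to_solve):
--     # Different algorithm: bucket the guess positions and the solution positions
--     # by letter, then resolve each letter's events independently (steps of
--     # distinct letters in the sequential scan touch disjoint solution slots,
--     # so they commute); finally emit the verdicts in index order.
--     events = {}
--     for i, c in enumerate(guess):
--         events.setdefault(c, []).append(i)
--     slots = {}
--     for j, c in enumerate(word_to_solve):
--         slots.setdefault(c, []).append(j)
--     res = {}
--     for c, ev in events.items():
--         avail = slots.get(c, [])
--         for i in ev:
--             if i in avail:
--                 avail.remove(i)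
--                 res[i] = 1
--             elif avail:
--                 avail.pop(0)
--                 res[i] = 0
--             else:
--                 res[i] = -1
--     return {i: res[i] for i in range(len(guess))}
-- ===== Notes on version B (the rewrite author's own statement) =====
-- stated objective: faster
-- what changed: Replaces A's global left-to-right scan with a mutable remaining-letters list (whole-word 'in'/'.index' scans each step) by bucketing guess positions and solution positions per letter and resolving each letter's events independently (cross-letter steps commute), emitting verdicts in index order at the end.
import Mathlib
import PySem

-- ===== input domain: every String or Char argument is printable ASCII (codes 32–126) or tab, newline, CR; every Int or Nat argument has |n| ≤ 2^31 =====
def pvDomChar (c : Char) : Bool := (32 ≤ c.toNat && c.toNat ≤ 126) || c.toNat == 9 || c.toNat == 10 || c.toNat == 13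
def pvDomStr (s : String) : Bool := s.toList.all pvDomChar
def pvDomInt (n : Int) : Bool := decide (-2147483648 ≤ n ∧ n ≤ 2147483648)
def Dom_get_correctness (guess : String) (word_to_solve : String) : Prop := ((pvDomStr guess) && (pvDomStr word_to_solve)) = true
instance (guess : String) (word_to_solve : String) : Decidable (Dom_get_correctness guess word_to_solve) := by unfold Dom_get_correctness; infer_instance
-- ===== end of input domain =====

-- B buckets the guess positions and the solution positions per letter and resolves each letter's
-- events independently (cross-letter steps of A's sequential scan touch disjoint slots, so they
-- commute), instead of A's global left-to-right scan over one mutable remaining-letters list;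
-- same return value on Pre_ (objective: faster by a constant factor — scans shrink to same-letter buckets).

-- ===== PORT A =====
-- loop body of A's `for i in range(len(guess))` (dict `correctness`, list `remaining_letters`)
def pvStepA (g : List Char) (st : PySem.Dict Int Int × List (Option Char)) (i : Int) :
    PySem.Dict Int Int × List (Option Char) :=
  let corr := st.1
  let rem := st.2
  let gi := PySem.List.pyGetD g i ' '
  if some gi = PySem.List.pyGetD rem i none then
    (corr.insert i 1, PySem.List.pySetD rem i none)
  else if some gi ∈ rem then
    (corr.insert i 0,
     PySem.List.pySetD rem ((PySem.List.index? rem (some gi)).getD 0 : Nat) none)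
  else
    (corr.insert i (-1), rem)

def get_correctness (guess : String) (word_to_solve : String) : List (Int × Int) :=
  let g := guess.toList
  let res := (PySem.List.pyRange 0 (g.length : Int) 1).foldl (pvStepA g)
    (PySem.Dict.empty, word_to_solve.toList.map some)
  res.1.items

-- ===== PORT B =====
-- Source B's bucketing loops `events.setdefault(c, []).append(i)` / `slots.setdefault(c, []).append(j)`
def pvBucket (xs : List Char) : PySem.Dict Char (List Int) :=
  (PySem.List.enumerate xs).foldl (fun d p => d.modify p.2 [] (· ++ [p.1])) PySem.Dict.empty

-- body of Source B's inner `for i in ev` loop (state: this letter's avail list, the res dict)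
def pvStepB (st : List Int × PySem.Dict Int Int) (i : Int) : List Int × PySem.Dict Int Int :=
  if i ∈ st.1 then ((PySem.List.remove? st.1 i).getD st.1, st.2.insert i 1)
  else if st.1 ≠ [] then (((PySem.List.pop? st.1 0).map (·.2)).getD st.1, st.2.insert i 0)
  else (st.1, st.2.insert i (-1))

-- one iteration of Source B's outer `for c, ev in events.items()` loop
def pvGroupB (slots : PySem.Dict Char (List Int)) (r : PySem.Dict Int Int)
    (ce : Char × List Int) : PySem.Dict Int Int :=
  (ce.2.foldl pvStepB (slots.getD ce.1 [], r)).2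

def get_correctness_alt (guess : String) (word_to_solve : String) : List (Int × Int) :=
  let g := guess.toList
  let events := pvBucket g
  let slots := pvBucket word_to_solve.toList
  let res := events.items.foldl (pvGroupB slots) PySem.Dict.empty
  ((PySem.List.pyRange 0 (g.length : Int) 1).foldl
    (fun d i => d.insert i (res.getD i 0)) PySem.Dict.empty).items

-- ===== PRECONDITION & SPEC =====
-- A indexes remaining_letters[i] for every i < len(guess), so it raises IndexError exactly
-- when the guess is longer than the solution word; nothing else is excluded.
def Pre_get_correctness (guess : String) (word_to_solve : String) : Prop :=
  guess.toList.length ≤ word_to_solve.toList.length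
instance (guess : String) (word_to_solve : String) : Decidable (Pre_get_correctness guess word_to_solve) := by unfold Pre_get_correctness; infer_instance

def pvWitness_get_correctness : String × String := ("cab", "bca")

def Spec_get_correctness (guess : String) (word_to_solve : String) (out : List (Int × Int)) : Prop := out = get_correctness_alt guess word_to_solve
instance (guess : String) (word_to_solve : String) (out : List (Int × Int)) : Decidable (Spec_get_correctness guess word_to_solve out) := by unfold Spec_get_correctness; infer_instance

-- ===== CLAIM (what is proved, stated in full; the proofs are below) =====
def Claim_equal_get_correctness : Prop := ∀ (guess : String) (word_to_solve : String), Dom_get_correctness guess word_to_solve → Pre_get_correctness guess word_to_solve → Spec_get_correctness guess word_to_solve (get_correctness guess word_to_solve)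


-- ===== LEMMAS AND PROOFS =====

-- positions of letter c in xs, ascending (the bucket lists of both `events` and `slots`)
def pvPosL (xs : List Char) (c : Char) : List Int :=
  (PySem.List.pyRange 0 (xs.length : Int) 1).filter (fun j => PySem.List.pyGetD xs j ' ' == c)

-- avail component of one per-letter step
def pvAvailStep (av : List Int) (e : Int) : List Int :=
  if e ∈ av then av.erase e else av.tail

-- this letter's avail list once all its events below i are resolved
def pvAvail (wl g : List Char) (c : Char) (i : Int) : List Int :=
  ((pvPosL g c).filter (fun e => decide (e < i))).foldl pvAvailStep (pvPosL wl c)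

def pvValOf (av : List Int) (i : Int) : Int :=
  if i ∈ av then 1 else if av ≠ [] then 0 else -1

-- the verdict both programs assign to guess position i
def pvVal (wl g : List Char) (i : Int) : Int :=
  pvValOf (pvAvail wl g (PySem.List.pyGetD g i ' ') i) i

def pvMask (cons : List Bool) (wl : List Char) : List (Option Char) :=
  List.zipWith (fun b c => if b then none else some c) cons wl

-- unconsumed slots of letter c
def pvFree (cons : List Bool) (wl : List Char) (c : Char) : List Int :=
  (pvPosL wl c).filter (fun j => !(PySem.List.pyGetD cons j false))

lemma pvMem_pos (wl : List Char) (c : Char) (j : Int) :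
    j ∈ pvPosL wl c ↔ 0 ≤ j ∧ j < wl.length ∧ PySem.List.pyGetD wl j ' ' = c := by
  simp [pvPosL, List.mem_filter, PySem.List.mem_pyRange_one, and_assoc]

lemma pvPos_sorted (wl : List Char) (c : Char) : (pvPosL wl c).Pairwise (· < ·) :=
  (PySem.List.pairwise_lt_pyRange_one 0 (wl.length : Int)).filter _

lemma pvMem_pos_nat (wl : List Char) (c : Char) (j : Nat) :
    (j : Int) ∈ pvPosL wl c ↔ ∃ hj : j < wl.length, wl[j]'hj = c := by
  rw [pvMem_pos]
  constructor
  · rintro ⟨-, h1, h2⟩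
    have hj : j < wl.length := by exact_mod_cast h1
    refine ⟨hj, ?_⟩
    rw [PySem.List.pyGetD_eq_getElem wl ' ' (by positivity) (by exact_mod_cast hj)] at h2
    simpa using h2
  · rintro ⟨hj, h⟩
    refine ⟨by positivity, by exact_mod_cast hj, ?_⟩
    rw [PySem.List.pyGetD_eq_getElem wl ' ' (by positivity) (by exact_mod_cast hj)]
    simpa using h

lemma pvMask_length (cons : List Bool) (wl : List Char) (hlen : cons.length = wl.length) :
    (pvMask cons wl).length = wl.length := by simp [pvMask, hlen]

lemma pvMask_getElem (cons : List Bool) (wl : List Char) (hlen : cons.length = wl.length)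
    (j : Nat) (hj : j < wl.length) :
    (pvMask cons wl)[j]'(by rw [pvMask_length cons wl hlen]; exact hj) =
      if cons[j]'(hlen ▸ hj) then none else some (wl[j]'hj) := by
  simp [pvMask]

lemma pvGetD_eq_getElem' (cons : List Bool) (j : Nat) (hj : j < cons.length) :
    PySem.List.pyGetD cons (j : Int) false = cons[j]'hj := by
  rw [PySem.List.pyGetD_eq_getElem cons false (by positivity) (by exact_mod_cast hj)]
  simp

lemma pvSetD_in_range {α : Type} (xs : List α) (i : Int) (v : α) (h0 : 0 ≤ i) (h1 : i < xs.length) :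
    PySem.List.pySetD xs i v = xs.set i.toNat v := by
  simp [PySem.List.pySetD, PySem.List.pySet?, PySem.List.pyIdx?, h0, h1]

-- membership in pvFree
lemma pvMem_free (cons : List Bool) (wl : List Char) (c : Char) (j : Int) :
    j ∈ pvFree cons wl c ↔ j ∈ pvPosL wl c ∧ PySem.List.pyGetD cons j false = false := by
  simp [pvFree, List.mem_filter]

lemma pvFree_sorted (cons : List Bool) (wl : List Char) (c : Char) :
    (pvFree cons wl c).Pairwise (· < ·) := (pvPos_sorted wl c).filter _

-- the filter-split lemma for a strictly increasing list
lemma pvFilterSucc (l : List Int) (hl : l.Pairwise (· < ·)) (i : Int) :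
    l.filter (fun e => decide (e < i + 1)) =
      l.filter (fun e => decide (e < i)) ++ (if i ∈ l then [i] else []) := by
  induction l with
  | nil => simp
  | cons x t ih =>
    rw [List.pairwise_cons] at hl
    obtain ⟨hx, ht⟩ := hl
    simp only [List.filter_cons, List.mem_cons]
    rcases lt_trichotomy x i with h1 | h1 | h1
    · have : ¬ (i = x) := by omega
      simp only [this, false_or]
      rw [if_pos (by simpa using (by omega : x < i + 1)), if_pos (by simpa using h1), ih ht]
      simp
    · subst h1
      have hnil1 : t.filter (fun e => decide (e < x + 1)) = [] :=
        List.filter_eq_nil_iff.mpr (fun e he => by have := hx e he; simpa using (by omega : ¬ e < x + 1))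
      have hnil2 : t.filter (fun e => decide (e < x)) = [] :=
        List.filter_eq_nil_iff.mpr (fun e he => by have := hx e he; simpa using (by omega : ¬ e < x))
      rw [if_pos (by simp), if_neg (by simp), hnil1, hnil2]
      simp
    · have hne : ¬ (i = x) := by omega
      simp only [hne, false_or]
      rw [if_neg (by simpa using (by omega : ¬ x < i + 1)), if_neg (by simpa using (by omega : ¬ x < i)), ih ht]

lemma pvMask_mem (cons : List Bool) (wl : List Char) (hlen : cons.length = wl.length) (c : Char) :
    some c ∈ pvMask cons wl ↔
      ∃ j, ∃ hj : j < wl.length, cons[j]'(hlen ▸ hj) = false ∧ wl[j]'hj = c := by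
  rw [List.mem_iff_getElem]
  constructor
  · rintro ⟨j, hj, he⟩
    rw [pvMask_length cons wl hlen] at hj
    rw [pvMask_getElem cons wl hlen j hj] at he
    by_cases hb : cons[j]'(hlen ▸ hj) <;> simp [hb] at he
    exact ⟨j, hj, by simpa using hb, he⟩
  · rintro ⟨j, hj, hb, he⟩
    exact ⟨j, by rw [pvMask_length cons wl hlen]; exact hj,
      by rw [pvMask_getElem cons wl hlen j hj, hb]; simp [he]⟩

-- green test ↔ membership in pvFree
lemma pvGreen_iff (cons : List Bool) (wl : List Char) (hlen : cons.length = wl.length)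
    (c : Char) (i : Int) (h0 : 0 ≤ i) (h1 : i < wl.length) :
    some c = PySem.List.pyGetD (pvMask cons wl) i none ↔ i ∈ pvFree cons wl c := by
  have hj : i.toNat < wl.length := by omega
  have hcast : ((i.toNat : Nat) : Int) = i := Int.toNat_of_nonneg h0
  rw [← hcast, PySem.List.pyGetD_eq_getElem (pvMask cons wl) none (by positivity)
    (by rw [pvMask_length cons wl hlen]; exact_mod_cast hj)]
  simp only [Int.toNat_natCast]
  rw [pvMask_getElem cons wl hlen i.toNat hj, pvMem_free, pvMem_pos_nat wl c i.toNat,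
    pvGetD_eq_getElem' cons i.toNat (hlen ▸ hj)]
  by_cases hb : cons[i.toNat]'(hlen ▸ hj) <;> simp [hb, hj, eq_comm]

-- yellow test ↔ pvFree nonempty
lemma pvYellow_iff (cons : List Bool) (wl : List Char) (hlen : cons.length = wl.length) (c : Char) :
    some c ∈ pvMask cons wl ↔ pvFree cons wl c ≠ [] := by
  rw [pvMask_mem cons wl hlen, Ne, List.eq_nil_iff_forall_not_mem]
  push Not
  constructor
  · rintro ⟨j, hj, hb, he⟩
    refine ⟨(j : Int), ?_⟩
    rw [pvMem_free, pvMem_pos_nat, pvGetD_eq_getElem' cons j (hlen ▸ hj)]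
    exact ⟨⟨hj, he⟩, hb⟩
  · rintro ⟨x, hx⟩
    rw [pvMem_free] at hx
    obtain ⟨hxp, hxb⟩ := hx
    obtain ⟨hx0, hx1, -⟩ := (pvMem_pos wl c x).mp hxp
    have hcast : ((x.toNat : Nat) : Int) = x := Int.toNat_of_nonneg hx0
    rw [← hcast, pvMem_pos_nat] at hxp
    obtain ⟨hj, he⟩ := hxp
    rw [← hcast, pvGetD_eq_getElem' cons x.toNat (hlen ▸ hj)] at hxb
    exact ⟨x.toNat, hj, hxb, he⟩

-- .index finds the head of pvFree
lemma pvIndex_head (cons : List Bool) (wl : List Char) (hlen : cons.length = wl.length)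
    (c : Char) (h t') (hft : pvFree cons wl c = h :: t') :
    PySem.List.index? (pvMask cons wl) (some c) = some h.toNat := by
  have hh : h ∈ pvFree cons wl c := by rw [hft]; exact List.mem_cons_self
  have hmin : ∀ x ∈ pvFree cons wl c, h ≤ x := by
    intro x hx
    rw [hft, List.mem_cons] at hx
    rcases hx with rfl | hx
    · exact le_refl _
    · have := pvFree_sorted cons wl c
      rw [hft, List.pairwise_cons] at this
      exact le_of_lt (this.1 x hx)
  rw [pvMem_free] at hh
  obtain ⟨hhp, hhb⟩ := hh
  obtain ⟨hh0, hh1, -⟩ := (pvMem_pos wl c h).mp hhp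
  have hcast : ((h.toNat : Nat) : Int) = h := Int.toNat_of_nonneg hh0
  have hjw : h.toNat < wl.length := by omega
  have hwc : wl[h.toNat]'hjw = c := by
    rw [← hcast, pvMem_pos_nat] at hhp
    exact hhp.choose_spec
  have hfree : cons[h.toNat]'(hlen ▸ hjw) = false := by
    rw [← hcast, pvGetD_eq_getElem' cons h.toNat (hlen ▸ hjw)] at hhb
    exact hhb
  rw [PySem.List.index?_eq_idxOf?, List.idxOf?_eq_some_iff]
  refine ⟨by rw [pvMask_length cons wl hlen]; exact hjw, ?_, ?_⟩
  · rw [pvMask_getElem cons wl hlen h.toNat hjw, hfree]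
    simp [hwc]
  · intro j hjlt heq
    have hjw' : j < wl.length := by omega
    rw [pvMask_getElem cons wl hlen j hjw'] at heq
    by_cases hb : cons[j]'(hlen ▸ hjw') <;> simp [hb] at heq
    have hjm : (j : Int) ∈ pvFree cons wl c := by
      rw [pvMem_free, pvMem_pos_nat, pvGetD_eq_getElem' cons j (hlen ▸ hjw')]
      exact ⟨⟨hjw', heq⟩, by simpa using hb⟩
    have := hmin _ hjm
    omega

-- consuming slot j updates every pvFree by dropping j
lemma pvFree_set (cons : List Bool) (wl : List Char) (hlen : cons.length = wl.length)
    (j : Int) (hj0 : 0 ≤ j) (hj1 : j < wl.length) (c : Char) :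
    pvFree (cons.set j.toNat true) wl c = (pvFree cons wl c).filter (fun x => decide (x ≠ j)) := by
  unfold pvFree
  rw [List.filter_filter]
  apply List.filter_congr
  intro x hx
  obtain ⟨hx0, hx1, -⟩ := (pvMem_pos wl c x).mp hx
  have hcast : ((x.toNat : Nat) : Int) = x := Int.toNat_of_nonneg hx0
  have hxw : x.toNat < wl.length := by omega
  by_cases hxe : x = j
  · subst hxe
    rw [← hcast]
    simp only [Int.toNat_natCast]
    rw [pvGetD_eq_getElem' (cons.set x.toNat true) x.toNat (by simpa [hlen] using hxw)]
    simp
  · have hne : x.toNat ≠ j.toNat := by omega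
    rw [← hcast, pvGetD_eq_getElem' (cons.set j.toNat true) x.toNat (by simpa [hlen] using hxw),
      List.getElem_set_ne (by omega), ← pvGetD_eq_getElem' cons x.toNat (hlen ▸ hxw), hcast]
    simp [hxe]

lemma pvMask_set (cons : List Bool) (wl : List Char) (hlen : cons.length = wl.length)
    (j : Nat) (hj : j < wl.length) :
    (pvMask cons wl).set j none = pvMask (cons.set j true) wl := by
  apply List.ext_getElem
  · simp [pvMask]
  · intro k hk1 hk2
    rw [pvMask_length (cons.set j true) wl (by simpa using hlen)] at hk2
    rw [pvMask_getElem (cons.set j true) wl (by simpa using hlen) k hk2]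
    rw [List.getElem_set]
    by_cases h : j = k
    · subst h; simp
    · rw [if_neg h, List.getElem_set, if_neg h, pvMask_getElem cons wl hlen k hk2]

lemma pvMask_replicate (wl : List Char) :
    wl.map some = pvMask (List.replicate wl.length false) wl := by
  induction wl with
  | nil => rfl
  | cons x t ih => simpa [pvMask, List.replicate_succ] using ih

lemma pvGetD_nat {α : Type} (xs : List α) (d : α) (j : Nat) (hj : j < xs.length) :
    PySem.List.pyGetD xs (j : Int) d = xs[j]'hj := by
  rw [PySem.List.pyGetD_eq_getElem xs d (by positivity) (by exact_mod_cast hj)]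
  simp

lemma pvAvail_succ (wl g : List Char) (c : Char) (n : Nat) :
    pvAvail wl g c ((n : Int) + 1) =
      if (n : Int) ∈ pvPosL g c then pvAvailStep (pvAvail wl g c (n : Int)) (n : Int)
      else pvAvail wl g c (n : Int) := by
  unfold pvAvail
  rw [pvFilterSucc _ (pvPos_sorted g c) _]
  split_ifs with h
  · rw [List.foldl_append]
    rfl
  · simp

-- pvStepB in closed form
lemma pvStepB_eq (st : List Int × PySem.Dict Int Int) (i : Int) :
    pvStepB st i = (pvAvailStep st.1 i, st.2.insert i (pvValOf st.1 i)) := by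
  obtain ⟨av, r⟩ := st
  simp only [pvStepB, pvAvailStep, pvValOf]
  by_cases hm : i ∈ av
  · rw [if_pos hm, if_pos hm, if_pos hm]
    simp [PySem.List.remove?_eq_some_erase av i hm]
  · rw [if_neg hm, if_neg hm, if_neg hm]
    cases av with
    | nil => simp
    | cons x t => simp [PySem.List.pop?_zero_cons]

-- the bucket dict looks up to pvPosL
lemma pvBucket_getD (xs : List Char) (c : Char) :
    (pvBucket xs).getD c [] = pvPosL xs c := by
  unfold pvBucket
  have h1 : (PySem.List.enumerate xs).foldl
        (fun d p => d.modify p.2 [] (· ++ [p.1])) (PySem.Dict.empty : PySem.Dict Char (List Int))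
      = ((PySem.List.enumerate xs).map (fun p => (p.2, p.1))).foldl
        (fun d q => d.modify q.1 [] (· ++ [q.2])) PySem.Dict.empty := by
    rw [List.foldl_map]
  rw [h1, PySem.Dict.getD_foldl_modify_append, PySem.List.enumerate_eq_map_pyRange xs ' ']
  simp [PySem.Dict.getD_empty, List.filter_map, List.map_map, Function.comp_def, pvPosL,
    PySem.List.len]

-- items of the events dict
lemma pvBucket_items (xs : List Char) :
    (pvBucket xs).items = (PySem.Set.ofList xs).map (fun c => (c, pvPosL xs c)) := by
  have hnd : (pvBucket xs).keys.Nodup := by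
    unfold pvBucket
    exact PySem.Dict.nodup_keys_foldl_modify_key _ _ _ _ _ (by simp [PySem.Dict.keys_empty])
  have hkeys : (pvBucket xs).keys = PySem.Set.ofList xs := by
    unfold pvBucket
    rw [PySem.Dict.keys_foldl_modify_key]
    simp [PySem.Dict.keys_empty, PySem.List.map_snd_enumerate, PySem.Set.update_nil_left]
  rw [PySem.Dict.items_eq_map_keys (pvBucket xs) hnd [], hkeys]
  exact List.map_congr_left (fun c _ => by rw [pvBucket_getD])

-- inner loop of B: each event of this group gets its pvVal, other keys untouched
lemma pvGroup_getD (wl g : List Char) (c : Char) (done todo : List Int)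
    (hsplit : pvPosL g c = done ++ todo) (r : PySem.Dict Int Int) (i : Int) :
    ((todo.foldl pvStepB (done.foldl pvAvailStep (pvPosL wl c), r)).2).getD i 0 =
      if i ∈ todo then pvVal wl g i else r.getD i 0 := by
  induction todo generalizing done r with
  | nil => simp
  | cons e rest ih =>
    have hsort := pvPos_sorted g c
    rw [hsplit] at hsort
    have hval : pvValOf (done.foldl pvAvailStep (pvPosL wl c)) e = pvVal wl g e := by
      have hmem : e ∈ pvPosL g c := by rw [hsplit]; simp
      obtain ⟨he0, he1, hec⟩ := (pvMem_pos g c e).mp hmem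
      have hfilt : (pvPosL g c).filter (fun x => decide (x < e)) = done := by
        rw [hsplit, List.filter_append]
        have h1 : done.filter (fun x => decide (x < e)) = done := by
          apply List.filter_eq_self.mpr
          intro x hx
          have := (List.pairwise_append.mp hsort).2.2 x hx e (by simp)
          simpa using this
        have h2 : (e :: rest).filter (fun x => decide (x < e)) = [] := by
          apply List.filter_eq_nil_iff.mpr
          intro x hx
          rcases List.mem_cons.mp hx with rfl | hx
          · simp
          · have := (List.pairwise_cons.mp (List.pairwise_append.mp hsort).2.1).1 x hx
            simp only [decide_eq_true_eq]
            omega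
        rw [h1, h2, List.append_nil]
      rw [pvVal, hec, pvAvail, hfilt]
    rw [List.foldl_cons, pvStepB_eq]
    have hstep : pvAvailStep (done.foldl pvAvailStep (pvPosL wl c)) e =
        (done ++ [e]).foldl pvAvailStep (pvPosL wl c) := by
      simp [List.foldl_append]
    rw [hstep]
    have := ih (done ++ [e]) (by rw [hsplit, List.append_assoc]; rfl)
      (r.insert e (pvValOf (done.foldl pvAvailStep (pvPosL wl c)) e))
    rw [this]
    have hnd : (done ++ e :: rest).Nodup := hsort.imp (fun h => ne_of_lt h)
    have hni : e ∉ rest := by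
      have := List.nodup_append.mp hnd
      exact (List.nodup_cons.mp this.2.1).1
    by_cases h1 : i ∈ rest
    · rw [if_pos h1, if_pos (List.mem_cons_of_mem _ h1)]
    · rw [if_neg h1, PySem.Dict.getD_insert]
      by_cases h2 : i = e
      · subst h2
        rw [if_pos rfl, if_pos List.mem_cons_self, hval]
      · rw [if_neg h2, if_neg (by simp [h2, h1])]

-- outer loop of B
lemma pvOuter_getD (wl g : List Char) (cs : List Char) (r : PySem.Dict Int Int) (i : Int)
    (hi0 : 0 ≤ i) (hi1 : i < g.length) :
    ((cs.map (fun c => (c, pvPosL g c))).foldl (pvGroupB (pvBucket wl)) r).getD i 0 =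
      if PySem.List.pyGetD g i ' ' ∈ cs then pvVal wl g i else r.getD i 0 := by
  induction cs generalizing r with
  | nil => simp
  | cons c rest ih =>
    simp only [List.map_cons, List.foldl_cons]
    have hgrp : pvGroupB (pvBucket wl) r (c, pvPosL g c) =
        ((pvPosL g c).foldl pvStepB (([] : List Int).foldl pvAvailStep (pvPosL wl c), r)).2 := by
      unfold pvGroupB
      rw [pvBucket_getD]
      rfl
    rw [ih]
    by_cases h1 : PySem.List.pyGetD g i ' ' ∈ rest
    · rw [if_pos h1, if_pos (List.mem_cons_of_mem _ h1)]
    · rw [if_neg h1, hgrp, pvGroup_getD wl g c [] (pvPosL g c) rfl r i]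
      by_cases h2 : PySem.List.pyGetD g i ' ' = c
      · rw [if_pos (by rw [pvMem_pos]; exact ⟨hi0, hi1, h2⟩),
          if_pos (by rw [List.mem_cons]; exact Or.inl h2)]
      · rw [if_neg (fun hm => h2 ((pvMem_pos g c i).mp hm).2.2),
          if_neg (by simp [h2, h1])]

-- B's res dict holds pvVal at every guess index
lemma pvRes_getD (wl g : List Char) (i : Int) (hi0 : 0 ≤ i) (hi1 : i < g.length) :
    ((pvBucket g).items.foldl (pvGroupB (pvBucket wl)) PySem.Dict.empty).getD i 0 =
      pvVal wl g i := by
  rw [pvBucket_items g, pvOuter_getD wl g _ _ i hi0 hi1, if_pos]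
  rw [PySem.Set.mem_ofList]
  have hj : i.toNat < g.length := by omega
  rw [show i = ((i.toNat : Nat) : Int) from (Int.toNat_of_nonneg hi0).symm, pvGetD_nat g ' ' i.toNat hj]
  exact List.getElem_mem hj

-- A's loop invariant: corr is the pvVal table so far, rem is a mask whose free slots per letter
-- are exactly the per-letter avail lists
lemma pvAinv (wl g : List Char) (hpre : g.length ≤ wl.length) (n : Nat) (hn : n ≤ g.length) :
    ∃ cons : List Bool, cons.length = wl.length ∧
      (PySem.List.pyRange 0 (n : Int) 1).foldl (pvStepA g) (PySem.Dict.empty, wl.map some) =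
        ((PySem.List.pyRange 0 (n : Int) 1).foldl
          (fun d i => d.insert i (pvVal wl g i)) PySem.Dict.empty, pvMask cons wl) ∧
      ∀ c, pvFree cons wl c = pvAvail wl g c n := by
  induction n with
  | zero =>
    refine ⟨List.replicate wl.length false, by simp, ?_, ?_⟩
    · simp only [Nat.cast_zero]
      rw [PySem.List.pyRange_one_eq_nil le_rfl]
      simp only [List.foldl_nil]
      rw [pvMask_replicate wl]
    · intro c
      have h1 : pvFree (List.replicate wl.length false) wl c = pvPosL wl c := by
        apply List.filter_eq_self.mpr
        intro x hx
        obtain ⟨hx0, hx1, -⟩ := (pvMem_pos wl c x).mp hx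
        have hxw : x.toNat < wl.length := by omega
        rw [show x = ((x.toNat : Nat) : Int) from (Int.toNat_of_nonneg hx0).symm,
          pvGetD_nat (List.replicate wl.length false) false x.toNat (by simpa using hxw)]
        simp
      have h2 : (pvPosL g c).filter (fun e => decide (e < (0 : Int))) = [] := by
        apply List.filter_eq_nil_iff.mpr
        intro x hx
        obtain ⟨hx0, -, -⟩ := (pvMem_pos g c x).mp hx
        simp only [decide_eq_true_eq]
        omega
      rw [h1, pvAvail]
      norm_num
      rw [h2]
      rfl
  | succ n ih =>
    obtain ⟨cons, hlen, heq, hfree⟩ := ih (by omega)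
    have hng : n < g.length := by omega
    have hig : ((n : Nat) : Int) < (g.length : Int) := by exact_mod_cast hng
    have hiw : ((n : Nat) : Int) < (wl.length : Int) := by
      exact_mod_cast lt_of_lt_of_le hng hpre
    have hcastn : (((n + 1) : Nat) : Int) = ((n : Nat) : Int) + 1 := by push_cast; ring
    rw [hcastn, PySem.List.pyRange_one_succ_right (by positivity), List.foldl_append,
      List.foldl_append, heq]
    simp only [List.foldl_cons, List.foldl_nil]
    have hmemg : ((n : Nat) : Int) ∈ pvPosL g (PySem.List.pyGetD g ((n : Nat) : Int) ' ') :=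
      (pvMem_pos g _ _).mpr ⟨by positivity, hig, rfl⟩
    by_cases hg : some (PySem.List.pyGetD g ((n : Nat) : Int) ' ') =
        PySem.List.pyGetD (pvMask cons wl) ((n : Nat) : Int) none
    · -- green branch
      have hmf : ((n : Nat) : Int) ∈ pvFree cons wl (PySem.List.pyGetD g ((n : Nat) : Int) ' ') :=
        (pvGreen_iff cons wl hlen _ _ (by positivity) hiw).mp hg
      have hwn : PySem.List.pyGetD wl ((n : Nat) : Int) ' ' =
          PySem.List.pyGetD g ((n : Nat) : Int) ' ' :=
        (((pvMem_pos wl _ _).mp ((pvMem_free cons wl _ _).mp hmf).1)).2.2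
      refine ⟨cons.set n true, by simp [hlen], ?_, ?_⟩
      · simp only [pvStepA]
        rw [if_pos hg]
        have h1 : pvVal wl g ((n : Nat) : Int) = 1 := by
          rw [pvVal, ← hfree, pvValOf, if_pos hmf]
        have h2 : PySem.List.pySetD (pvMask cons wl) ((n : Nat) : Int) none =
            pvMask (cons.set n true) wl := by
          rw [pvSetD_in_range _ _ _ (by positivity)
            (by rw [pvMask_length cons wl hlen]; exact_mod_cast hiw)]
          simp only [Int.toNat_natCast]
          exact pvMask_set cons wl hlen n (by exact_mod_cast hiw)
        rw [h1, h2]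
      · intro c'
        have hset : pvFree (cons.set n true) wl c' =
            (pvFree cons wl c').filter (fun x => decide (x ≠ ((n : Nat) : Int))) := by
          have := pvFree_set cons wl hlen ((n : Nat) : Int) (by positivity) hiw c'
          simpa using this
        rw [hset, pvAvail_succ]
        by_cases hcc : c' = PySem.List.pyGetD g ((n : Nat) : Int) ' '
        · subst hcc
          rw [if_pos hmemg, ← hfree, pvAvailStep, if_pos hmf,
            List.Nodup.erase_eq_filter ((pvFree_sorted cons wl _).imp (fun h => ne_of_lt h))]
          exact List.filter_congr (fun x _ => by by_cases hx : x = ((n : Nat) : Int) <;> simp [hx])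
        · rw [if_neg (fun hm => hcc (((pvMem_pos g c' _).mp hm).2.2.symm)), ← hfree]
          apply List.filter_eq_self.mpr
          intro x hx
          simp only [decide_eq_true_eq]
          intro hxe
          subst hxe
          exact hcc ((((pvMem_pos wl c' _).mp ((pvMem_free cons wl c' _).mp hx).1).2.2.symm).trans hwn)
    · by_cases hy : some (PySem.List.pyGetD g ((n : Nat) : Int) ' ') ∈ pvMask cons wl
      · -- yellow branch
        have hfne : pvFree cons wl (PySem.List.pyGetD g ((n : Nat) : Int) ' ') ≠ [] :=
          (pvYellow_iff cons wl hlen _).mp hy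
        have hnmf : ((n : Nat) : Int) ∉ pvFree cons wl (PySem.List.pyGetD g ((n : Nat) : Int) ' ') :=
          fun hm => hg ((pvGreen_iff cons wl hlen _ _ (by positivity) hiw).mpr hm)
        cases hft : pvFree cons wl (PySem.List.pyGetD g ((n : Nat) : Int) ' ') with
        | nil => exact absurd hft hfne
        | cons h t' =>
          have hidx := pvIndex_head cons wl hlen _ h t' hft
          have hhm : h ∈ pvFree cons wl (PySem.List.pyGetD g ((n : Nat) : Int) ' ') := by
            rw [hft]; exact List.mem_cons_self
          obtain ⟨hh0, hh1, hhw⟩ := (pvMem_pos wl _ _).mp ((pvMem_free cons wl _ _).mp hhm).1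
          refine ⟨cons.set h.toNat true, by simp [hlen], ?_, ?_⟩
          · simp only [pvStepA]
            rw [if_neg hg, if_pos hy, hidx]
            have h1 : pvVal wl g ((n : Nat) : Int) = 0 := by
              rw [pvVal, ← hfree, pvValOf, if_neg hnmf, if_pos hfne]
            have h2 : PySem.List.pySetD (pvMask cons wl) (((some h.toNat).getD 0 : Nat) : Int) none =
                pvMask (cons.set h.toNat true) wl := by
              simp only [Option.getD_some]
              rw [pvSetD_in_range _ _ _ (by positivity)
                (by rw [pvMask_length cons wl hlen]; exact_mod_cast (by omega : (h.toNat : Int) < (wl.length : Int)))]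
              simp only [Int.toNat_natCast]
              exact pvMask_set cons wl hlen h.toNat (by omega)
            rw [h1, h2]
          · intro c'
            have hset : pvFree (cons.set h.toNat true) wl c' =
                (pvFree cons wl c').filter (fun x => decide (x ≠ h)) :=
              pvFree_set cons wl hlen h hh0 hh1 c'
            rw [hset, pvAvail_succ]
            by_cases hcc : c' = PySem.List.pyGetD g ((n : Nat) : Int) ' '
            · subst hcc
              rw [if_pos hmemg, ← hfree, pvAvailStep, if_neg hnmf, hft]
              have hpw := pvFree_sorted cons wl (PySem.List.pyGetD g ((n : Nat) : Int) ' ')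
              rw [hft, List.pairwise_cons] at hpw
              simp only [List.filter_cons, decide_eq_true_eq]
              rw [if_neg (by simp)]
              have : t'.filter (fun x => decide (x ≠ h)) = t' := by
                apply List.filter_eq_self.mpr
                intro x hx
                simp only [decide_eq_true_eq]
                exact fun hxe => absurd (hxe ▸ hpw.1 x hx) (lt_irrefl h)
              rw [this]
              rfl
            · rw [if_neg (fun hm => hcc (((pvMem_pos g c' _).mp hm).2.2.symm)), ← hfree]
              apply List.filter_eq_self.mpr
              intro x hx
              simp only [decide_eq_true_eq]
              intro hxe
              subst hxe
              exact hcc ((((pvMem_pos wl c' _).mp ((pvMem_free cons wl c' _).mp hx).1).2.2.symm).trans hhw)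
      · -- gray branch
        have hfe : pvFree cons wl (PySem.List.pyGetD g ((n : Nat) : Int) ' ') = [] := by
          by_contra hne
          exact hy ((pvYellow_iff cons wl hlen _).mpr hne)
        refine ⟨cons, hlen, ?_, ?_⟩
        · simp only [pvStepA]
          rw [if_neg hg, if_neg hy]
          have h1 : pvVal wl g ((n : Nat) : Int) = -1 := by
            rw [pvVal, ← hfree, pvValOf, if_neg (by rw [hfe]; simp), if_neg (by rw [hfe]; simp)]
          rw [h1]
        · intro c'
          rw [pvAvail_succ]
          by_cases hcc : c' = PySem.List.pyGetD g ((n : Nat) : Int) ' '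
          · subst hcc
            rw [if_pos hmemg, ← hfree, hfe]
            rfl
          · rw [if_neg (fun hm => hcc (((pvMem_pos g c' _).mp hm).2.2.symm)), hfree]

lemma pvMain (guess word : String) (hpre : guess.toList.length ≤ word.toList.length) :
    get_correctness guess word = get_correctness_alt guess word := by
  obtain ⟨cons, hlen, heq, -⟩ :=
    pvAinv word.toList guess.toList hpre guess.toList.length le_rfl
  unfold get_correctness get_correctness_alt
  simp only
  rw [heq]
  have hcong : (PySem.List.pyRange 0 (guess.toList.length : Int) 1).foldl
        (fun d i => d.insert i (pvVal word.toList guess.toList i)) PySem.Dict.empty =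
      (PySem.List.pyRange 0 (guess.toList.length : Int) 1).foldl
        (fun d i => d.insert i
          (((pvBucket guess.toList).items.foldl (pvGroupB (pvBucket word.toList))
            PySem.Dict.empty).getD i 0)) PySem.Dict.empty := by
    apply PySem.List.foldl_congr_mem
    intro acc x hx
    rw [PySem.List.mem_pyRange_one] at hx
    rw [pvRes_getD word.toList guess.toList x hx.1 hx.2]
  rw [hcong]

-- ===== VERDICT (by name: the statement is the Claim_ definition above) =====
theorem get_correctness_spec : Claim_equal_get_correctness := by
  intro guess word _ hpre
  unfold Spec_get_correctness
  exact pvMain guess word hpre
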